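-- pv_equiv track=rewrite | github.com/dhruvinrsoni/agentskills-garden | skills/01_code_understanding/analyze_history/main.py | classify_commit_message
-- ===== SOURCE A (Python) =====
-- def classify_commit_message(message: str) -> str:
--     """Classify commit message to determine change type."""
--     message_lower = message.lower()
--
--     if any(word in message_lower for word in ["fix", "bug", "issue", "error", "crash"]):
--         return "bugfix"
--     elif any(word in message_lower for word in ["feat", "add", "new", "implement"]):
--         return "feature"
--     elif any(word in message_lower for word in ["refactor", "clean", "improve", "optimize"]):
--         return "refactor"
--     elif any(word in message_lower for word in ["doc", "comment", "readme"]):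
--         return "documentation"
--     elif any(word in message_lower for word in ["test", "spec"]):
--         return "testing"
--     elif any(word in message_lower for word in ["merge", "revert"]):
--         return "merge"
--     else:
--         return "update"
-- ===== SOURCE B (Python) =====
-- CATEGORIES = ["bugfix", "feature", "refactor", "documentation", "testing", "merge", "update"]
--
-- KEYWORD_RANK = {
--     "fix": 0, "bug": 0, "issue": 0, "error": 0, "crash": 0,
--     "feat": 1, "add": 1, "new": 1, "implement": 1,
--     "refactor": 2, "clean": 2, "improve": 2, "optimize": 2,
--     "doc": 3, "comment": 3, "readme": 3,
--     "test": 4, "spec": 4,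
--     "merge": 5, "revert": 5,
-- }
--
--
-- def classify_commit_message(message: str) -> str:
--     """Classify commit message to determine change type."""
--     m = message.lower()
--     best = 6  # rank of the fallback category "update"
--     for i in range(len(m)):
--         for kw, rank in KEYWORD_RANK.items():
--             if rank < best and m.startswith(kw, i):
--                 best = rank
--     return CATEGORIES[best]
-- ===== Notes on version B (the rewrite author's own statement) =====
-- stated objective: alternative
-- what changed: Instead of A's six per-category any-substring-containment tests, B makes a single left-to-right scan over the lowercased message positions, checking which keywords start at each position and keeping the best (lowest) priority rank in an accumulator, then maps the rank to its category.
import Mathlib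
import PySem

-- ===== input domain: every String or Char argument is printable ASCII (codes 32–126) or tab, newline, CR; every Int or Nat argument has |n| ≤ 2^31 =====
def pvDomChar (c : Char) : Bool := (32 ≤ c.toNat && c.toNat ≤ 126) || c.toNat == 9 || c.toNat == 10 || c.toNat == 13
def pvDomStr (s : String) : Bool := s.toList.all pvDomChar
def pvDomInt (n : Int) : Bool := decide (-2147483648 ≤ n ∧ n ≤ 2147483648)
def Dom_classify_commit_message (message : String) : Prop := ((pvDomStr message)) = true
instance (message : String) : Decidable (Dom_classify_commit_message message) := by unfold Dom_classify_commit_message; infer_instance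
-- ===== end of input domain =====

-- B replaces A's six per-category substring-containment tests by a single left-to-right scan
-- over the message positions that keeps the best (lowest) matched priority rank (alternative, same cost).

-- ===== PORT A =====
def classify_commit_message (message : String) : String :=
  let message_lower := PySem.Str.lower message
  if ["fix", "bug", "issue", "error", "crash"].any (fun word => PySem.Str.isIn word message_lower) then "bugfix"
  else if ["feat", "add", "new", "implement"].any (fun word => PySem.Str.isIn word message_lower) then "feature"
  else if ["refactor", "clean", "improve", "optimize"].any (fun word => PySem.Str.isIn word message_lower) then "refactor"
  else if ["doc", "comment", "readme"].any (fun word => PySem.Str.isIn word message_lower) then "documentation"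
  else if ["test", "spec"].any (fun word => PySem.Str.isIn word message_lower) then "testing"
  else if ["merge", "revert"].any (fun word => PySem.Str.isIn word message_lower) then "merge"
  else "update"

-- ===== PORT B =====
def pvCategories : List String :=
  ["bugfix", "feature", "refactor", "documentation", "testing", "merge", "update"]

-- KEYWORD_RANK.items() in insertion order
def pvKwRank : List (List Char × Nat) :=
  [("fix".toList, 0), ("bug".toList, 0), ("issue".toList, 0), ("error".toList, 0), ("crash".toList, 0),
   ("feat".toList, 1), ("add".toList, 1), ("new".toList, 1), ("implement".toList, 1),
   ("refactor".toList, 2), ("clean".toList, 2), ("improve".toList, 2), ("optimize".toList, 2),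
   ("doc".toList, 3), ("comment".toList, 3), ("readme".toList, 3),
   ("test".toList, 4), ("spec".toList, 4),
   ("merge".toList, 5), ("revert".toList, 5)]

-- the inner for-loop body: `if rank < best and m.startswith(kw, i): best = rank`
def pvStep (s : List Char) (b : Nat) (p : List Char × Nat) : Nat :=
  if p.2 < b ∧ PySem.Chars.startswith s p.1 = true then p.2 else b

-- one iteration of the outer loop at position i (s = m[i:]; m.startswith(kw, i) = s.startswith(kw))
def pvInner (s : List Char) (best : Nat) : Nat := pvKwRank.foldl (pvStep s) best

-- the outer loop `for i in range(len(m))`, recursing over the suffixes of m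
def pvScan : List Char → Nat → Nat
  | [], best => best
  | c :: t, best => pvScan t (pvInner (c :: t) best)

def classify_commit_message_alt (message : String) : String :=
  let m := PySem.Str.lower message
  -- CATEGORIES[best]: best is always ≤ 6, so getD is exact
  pvCategories.getD (pvScan m.toList 6) "update"

-- ===== PRECONDITION & SPEC =====
def Spec_classify_commit_message (message : String) (out : String) : Prop := out = classify_commit_message_alt message
instance (message : String) (out : String) : Decidable (Spec_classify_commit_message message out) := by unfold Spec_classify_commit_message; infer_instance

-- ===== CLAIM (what is proved, stated in full; the proofs are below) =====
def Claim_equal_classify_commit_message : Prop := ∀ (message : String), Dom_classify_commit_message message → Spec_classify_commit_message message (classify_commit_message message)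

-- ===== LEMMAS AND PROOFS =====

-- keyword groups (proof-side only)
def pvG0 : List (List Char) := ["fix".toList, "bug".toList, "issue".toList, "error".toList, "crash".toList]
def pvG1 : List (List Char) := ["feat".toList, "add".toList, "new".toList, "implement".toList]
def pvG2 : List (List Char) := ["refactor".toList, "clean".toList, "improve".toList, "optimize".toList]
def pvG3 : List (List Char) := ["doc".toList, "comment".toList, "readme".toList]
def pvG4 : List (List Char) := ["test".toList, "spec".toList]
def pvG5 : List (List Char) := ["merge".toList, "revert".toList]

def pvHit (g : List (List Char)) (m : List Char) : Bool := g.any (fun kw => PySem.Chars.isIn kw m)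
def pvPHit (g : List (List Char)) (s : List Char) : Bool := g.any (fun kw => PySem.Chars.startswith s kw)

def pvFirstIdx (a0 a1 a2 a3 a4 a5 : Bool) : Nat :=
  if a0 then 0 else if a1 then 1 else if a2 then 2 else if a3 then 3 else if a4 then 4 else if a5 then 5 else 6

def pvRank (m : List Char) : Nat :=
  pvFirstIdx (pvHit pvG0 m) (pvHit pvG1 m) (pvHit pvG2 m) (pvHit pvG3 m) (pvHit pvG4 m) (pvHit pvG5 m)

lemma pvKwRank_eq : pvKwRank =
    pvG0.map (fun kw => (kw, 0)) ++ pvG1.map (fun kw => (kw, 1)) ++ pvG2.map (fun kw => (kw, 2)) ++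
    pvG3.map (fun kw => (kw, 3)) ++ pvG4.map (fun kw => (kw, 4)) ++ pvG5.map (fun kw => (kw, 5)) := by
  rfl

-- folding a group of keywords that all carry the same rank r
lemma pvFoldl_group (s : List Char) (r : Nat) :
    ∀ (g : List (List Char)) (b : Nat),
      (g.map (fun kw => (kw, r))).foldl (pvStep s) b = if pvPHit g s then min b r else b := by
  intro g
  induction g with
  | nil => intro b; simp [pvPHit]
  | cons kw g ih =>
    intro b
    rw [List.map_cons, List.foldl_cons, ih]
    simp only [pvStep, pvPHit, List.any_cons]
    by_cases h1 : PySem.Chars.startswith s kw = true <;>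
      by_cases h2 : (g.any fun kw => PySem.Chars.startswith s kw) = true <;>
        simp [h1, h2] <;> split_ifs <;> omega

-- pure boolean/arith shape of one pvInner pass
lemma pvMinChain (b : Nat) (hb : b ≤ 6) (a0 a1 a2 a3 a4 a5 : Bool) :
    (let b0 := if a0 then min b 0 else b
     let b1 := if a1 then min b0 1 else b0
     let b2 := if a2 then min b1 2 else b1
     let b3 := if a3 then min b2 3 else b2
     let b4 := if a4 then min b3 4 else b3
     if a5 then min b4 5 else b4) = min b (pvFirstIdx a0 a1 a2 a3 a4 a5) := by
  rcases a0 <;> rcases a1 <;> rcases a2 <;> rcases a3 <;> rcases a4 <;> rcases a5 <;>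
    simp [pvFirstIdx] <;> omega

lemma pvInner_closed (s : List Char) (b : Nat) (hb : b ≤ 6) :
    pvInner s b = min b (pvFirstIdx (pvPHit pvG0 s) (pvPHit pvG1 s) (pvPHit pvG2 s)
                          (pvPHit pvG3 s) (pvPHit pvG4 s) (pvPHit pvG5 s)) := by
  have := pvMinChain b hb (pvPHit pvG0 s) (pvPHit pvG1 s) (pvPHit pvG2 s) (pvPHit pvG3 s)
      (pvPHit pvG4 s) (pvPHit pvG5 s)
  simp only at this
  rw [pvInner, pvKwRank_eq]
  simp only [List.foldl_append, pvFoldl_group]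
  exact this

lemma pvFirstIdx_le (a0 a1 a2 a3 a4 a5 : Bool) : pvFirstIdx a0 a1 a2 a3 a4 a5 ≤ 6 := by
  rcases a0 <;> rcases a1 <;> rcases a2 <;> rcases a3 <;> rcases a4 <;> rcases a5 <;> decide

-- a keyword is somewhere in c::t iff it starts at position 0 or is somewhere in t
lemma pvHit_cons (g : List (List Char)) (c : Char) (t : List Char) :
    pvHit g (c :: t) = (pvPHit g (c :: t) || pvHit g t) := by
  rcases h : pvPHit g (c :: t) || pvHit g t with _ | _
  · simp only [Bool.or_eq_false_iff] at h
    simp only [pvPHit, pvHit, List.any_eq_false] at h ⊢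
    intro kw hkw
    have h1 := h.1 kw hkw
    have h2 := h.2 kw hkw
    rw [PySem.Chars.isIn_iff_infix] at h2
    rw [PySem.Chars.startswith_iff] at h1
    rw [PySem.Chars.isIn_iff_infix, List.infix_cons_iff]
    tauto
  · simp only [Bool.or_eq_true] at h
    simp only [pvPHit, pvHit, List.any_eq_true] at h ⊢
    rcases h with ⟨kw, hkw, hp⟩ | ⟨kw, hkw, hi⟩
    · exact ⟨kw, hkw, by rw [PySem.Chars.isIn_iff_infix, List.infix_cons_iff]
                         rw [PySem.Chars.startswith_iff] at hp; exact Or.inl hp⟩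
    · exact ⟨kw, hkw, by rw [PySem.Chars.isIn_iff_infix, List.infix_cons_iff]
                         rw [PySem.Chars.isIn_iff_infix] at hi; exact Or.inr hi⟩

lemma pvFirstIdx_or (x0 x1 x2 x3 x4 x5 y0 y1 y2 y3 y4 y5 : Bool) :
    pvFirstIdx (x0 || y0) (x1 || y1) (x2 || y2) (x3 || y3) (x4 || y4) (x5 || y5)
      = min (pvFirstIdx x0 x1 x2 x3 x4 x5) (pvFirstIdx y0 y1 y2 y3 y4 y5) := by
  rcases x0 <;> rcases x1 <;> rcases x2 <;> rcases x3 <;> rcases x4 <;> rcases x5 <;>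
    rcases y0 <;> rcases y1 <;> rcases y2 <;> rcases y3 <;> rcases y4 <;> rcases y5 <;> rfl

lemma pvRank_cons (c : Char) (t : List Char) :
    pvRank (c :: t) = min (pvFirstIdx (pvPHit pvG0 (c :: t)) (pvPHit pvG1 (c :: t))
        (pvPHit pvG2 (c :: t)) (pvPHit pvG3 (c :: t)) (pvPHit pvG4 (c :: t)) (pvPHit pvG5 (c :: t)))
      (pvRank t) := by
  unfold pvRank
  simp only [pvHit_cons]
  exact pvFirstIdx_or _ _ _ _ _ _ _ _ _ _ _ _

lemma pvScan_eq : ∀ (m : List Char) (b : Nat), b ≤ 6 → pvScan m b = min b (pvRank m) := by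
  intro m
  induction m with
  | nil =>
    intro b hb
    have h0 : pvRank [] = 6 := by decide
    rw [h0]
    show b = min b 6
    omega
  | cons c t ih =>
    intro b hb
    rw [pvScan, pvInner_closed _ _ hb]
    have hle : min b (pvFirstIdx (pvPHit pvG0 (c :: t)) (pvPHit pvG1 (c :: t)) (pvPHit pvG2 (c :: t))
        (pvPHit pvG3 (c :: t)) (pvPHit pvG4 (c :: t)) (pvPHit pvG5 (c :: t))) ≤ 6 := by
      have := pvFirstIdx_le (pvPHit pvG0 (c :: t)) (pvPHit pvG1 (c :: t)) (pvPHit pvG2 (c :: t))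
        (pvPHit pvG3 (c :: t)) (pvPHit pvG4 (c :: t)) (pvPHit pvG5 (c :: t))
      omega
    rw [ih _ hle, pvRank_cons]
    omega

-- the final nested-if of A in terms of pvFirstIdx
lemma pvNestedIf_eq (a0 a1 a2 a3 a4 a5 : Bool) :
    (if a0 then "bugfix" else if a1 then "feature" else if a2 then "refactor"
     else if a3 then "documentation" else if a4 then "testing" else if a5 then "merge" else "update")
      = pvCategories.getD (pvFirstIdx a0 a1 a2 a3 a4 a5) "update" := by
  rcases a0 <;> rcases a1 <;> rcases a2 <;> rcases a3 <;> rcases a4 <;> rcases a5 <;> rfl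

lemma pvCondA (g : List (List Char)) (ws : List String) (ml : String)
    (h : g = ws.map String.toList) :
    ws.any (fun word => PySem.Str.isIn word ml) = pvHit g ml.toList := by
  subst h
  simp [pvHit, List.any_map, Function.comp_def]

-- ===== VERDICT (by name: the statement is the Claim_ definition above) =====
theorem classify_commit_message_spec : Claim_equal_classify_commit_message := by
  intro message _
  unfold Spec_classify_commit_message classify_commit_message classify_commit_message_alt
  simp only []
  rw [pvScan_eq _ 6 (le_refl 6)]
  have h6 : min 6 (pvRank (PySem.Str.lower message).toList) = pvRank (PySem.Str.lower message).toList := by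
    have := pvFirstIdx_le (pvHit pvG0 (PySem.Str.lower message).toList)
      (pvHit pvG1 (PySem.Str.lower message).toList) (pvHit pvG2 (PySem.Str.lower message).toList)
      (pvHit pvG3 (PySem.Str.lower message).toList) (pvHit pvG4 (PySem.Str.lower message).toList)
      (pvHit pvG5 (PySem.Str.lower message).toList)
    unfold pvRank; omega
  rw [h6]
  rw [pvCondA pvG0 _ _ (by rfl), pvCondA pvG1 _ _ (by rfl), pvCondA pvG2 _ _ (by rfl),
      pvCondA pvG3 _ _ (by rfl), pvCondA pvG4 _ _ (by rfl), pvCondA pvG5 _ _ (by rfl)]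
  exact pvNestedIf_eq _ _ _ _ _ _
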